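-- pv_equiv track=rewrite | github.com/jvitasek/VUT-FIT-IPP-Proj2 | parser.py | remove_char_literals
-- ===== SOURCE A (Python) =====
-- def remove_char_literals(string):
--     """!
--     @brief Removes all C char literals.
--     Matches all the C char literals and removes them (substitutes with '').
--
--     @param string The content of the file passed.
--     @return Returns the edited content of the file.
--     """
--     # bool value to know if we're inside a char literal
--     inside_char = False
--     # bool value to know we just passed the first single quote
--     first_pass = False
--     final_content = list()
--     # for every char of the content passed
--     for index in range(0, len(string)):
--         # start of the char literal
--         if string[index] == '\'' and first_pass is False:
--             inside_char = True
--             first_pass = True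
--             continue
--         # end of the char literal
--         if string[index] == '\'':
--             inside_char = False
--             first_pass = False
--             continue
--         # storing the content outside of the char literal
--         if inside_char is False:
--             final_content.append(string[index])
--     # joining the list contents into a string
--     final_content = ''.join(final_content)
--     # returning the final string
--     return final_content
-- ===== SOURCE B (Python) =====
-- def remove_char_literals(string):
--     # Split on the quote delimiter; the even-indexed segments are the text
--     # outside char literals (an unmatched trailing quote leaves its tail at
--     # an odd index, so it is discarded, matching the toggle state machine).
--     parts = string.split("'")
--     return ''.join(parts[::2])
-- ===== Notes on version B (the rewrite author's own statement) =====
-- stated objective: simpler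
-- what changed: Replaced the per-character toggle state machine (inside_char/first_pass flags with an accumulator list) by a two-line split on the quote character followed by joining the even-indexed segments.
import Mathlib
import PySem

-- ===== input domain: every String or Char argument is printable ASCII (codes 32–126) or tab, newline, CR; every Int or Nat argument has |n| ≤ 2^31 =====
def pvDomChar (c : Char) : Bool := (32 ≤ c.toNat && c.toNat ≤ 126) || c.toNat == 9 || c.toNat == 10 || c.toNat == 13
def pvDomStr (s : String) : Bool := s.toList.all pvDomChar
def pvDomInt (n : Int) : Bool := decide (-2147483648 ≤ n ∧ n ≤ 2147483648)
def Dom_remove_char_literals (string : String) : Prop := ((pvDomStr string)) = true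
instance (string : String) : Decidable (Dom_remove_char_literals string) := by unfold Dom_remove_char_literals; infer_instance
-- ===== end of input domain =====

-- B replaces A's per-character toggle state machine by split-on-quote + join of the
-- even-indexed segments (objective: simpler).

-- ===== PORT A =====
-- A's loop body: state is (inside_char, first_pass, final_content); branches in source order.
def pvStepA (st : Bool × Bool × List Char) (c : Char) : Bool × Bool × List Char :=
  if c = '\'' ∧ st.2.1 = false then (true, true, st.2.2)
  else if c = '\'' then (false, false, st.2.2)
  else if st.1 = false then (st.1, st.2.1, st.2.2 ++ [c])
  else st

-- 'for index in range(0, len(string)): … string[index] …' visits the characters in order;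
-- ''.join of the collected one-character strings is String.ofList of the collected chars.
def remove_char_literals (string : String) : String :=
  String.ofList (string.toList.foldl pvStepA (false, false, [])).2.2

-- ===== PORT B =====
-- parts = string.split("'"); return ''.join(parts[::2]).  The slice step is the
-- literal 2 ≠ 0, so slice? is always `some`; .getD [] only makes it total.
def remove_char_literals_alt (string : String) : String :=
  let parts := PySem.Chars.splitOn string.toList ['\'']
  let evens := (PySem.List.slice? parts none none 2).getD []
  String.ofList (PySem.Chars.join [] evens)

-- ===== PRECONDITION & SPEC =====
def Spec_remove_char_literals (string : String) (out : String) : Prop := out = remove_char_literals_alt string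
instance (string : String) (out : String) : Decidable (Spec_remove_char_literals string out) := by unfold Spec_remove_char_literals; infer_instance

-- ===== CLAIM (what is proved, stated in full; the proofs are below) =====
def Claim_equal_remove_char_literals : Prop := ∀ (string : String), Dom_remove_char_literals string → Spec_remove_char_literals string (remove_char_literals string)

-- ===== LEMMAS AND PROOFS =====

-- Recursive characterisation of A's state machine (the two flags always coincide).
def pvGo : Bool → List Char → List Char
  | _, [] => []
  | false, c :: r => if c = '\'' then pvGo true r else c :: pvGo false r
  | true,  c :: r => if c = '\'' then pvGo false r else pvGo true r

theorem pvFoldA (cs : List Char) : ∀ (b : Bool) (acc : List Char),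
    (cs.foldl pvStepA (b, b, acc)).2.2 = acc ++ pvGo b cs := by
  induction cs with
  | nil => intro b acc; simp [pvGo]
  | cons c r ih =>
    intro b acc
    cases b <;> by_cases hc : c = '\'' <;>
      simp [pvStepA, pvGo, hc, ih]

-- Recursive characterisation of split on a single quote.
def pvSplit : List Char → List (List Char)
  | [] => [[]]
  | c :: r => if c = '\'' then [] :: pvSplit r else (pvSplit r).modifyHead (c :: ·)

theorem pvSplit_ne_nil (cs : List Char) : pvSplit cs ≠ [] := by
  induction cs with
  | nil => simp [pvSplit]
  | cons c r ih =>
    simp only [pvSplit]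
    split
    · simp
    · cases hs : pvSplit r with
      | nil => exact absurd hs ih
      | cons a l => simp [List.modifyHead]

theorem pvSplitOn_go (fuel : Nat) : ∀ (cs cur : List Char) (acc : List (List Char)),
    cs.length < fuel →
    PySem.Chars.splitOn.go ['\''] fuel cs cur acc
      = acc.reverse ++ (pvSplit cs).modifyHead (cur.reverse ++ ·) := by
  induction fuel with
  | zero => intro cs cur acc h; omega
  | succ fuel ih =>
    intro cs cur acc h
    cases cs with
    | nil => simp [PySem.Chars.splitOn.go, pvSplit]
    | cons c r =>
      by_cases hc : c = '\''
      · subst hc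
        have hpre : List.isPrefixOf ['\''] ('\'' :: r) = true := by
          simp [List.isPrefixOf]
        simp only [PySem.Chars.splitOn.go, hpre, if_pos, List.length_cons,
          List.length_nil, List.drop_succ_cons, List.drop_zero]
        rw [ih r [] (cur.reverse :: acc) (by simpa using Nat.lt_of_succ_lt_succ h)]
        simp only [pvSplit, if_pos]
        cases hsp : pvSplit r with
        | nil => exact absurd hsp (pvSplit_ne_nil r)
        | cons h t => simp [List.modifyHead]
      · have hpre : List.isPrefixOf ['\''] (c :: r) = false := by
          simp [List.isPrefixOf, Ne.symm hc]
        simp only [PySem.Chars.splitOn.go, hpre]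
        rw [ih r (c :: cur) acc (by simpa using Nat.lt_of_succ_lt_succ h)]
        simp only [pvSplit, if_neg hc, List.reverse_cons]
        cases hsp : pvSplit r with
        | nil => exact absurd hsp (pvSplit_ne_nil r)
        | cons h t => simp [List.modifyHead]
  
theorem pvSplitOn_eq (cs : List Char) :
    PySem.Chars.splitOn cs ['\''] = pvSplit cs := by
  show PySem.Chars.splitOn.go ['\''] (cs.length + 1) cs [] [] = pvSplit cs
  rw [pvSplitOn_go (cs.length + 1) cs [] [] (by omega)]
  cases hsp : pvSplit cs with
  | nil => exact absurd hsp (pvSplit_ne_nil cs)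
  | cons h t => simp [List.modifyHead]

-- Even-indexed elements of a list.
def pvEvens {α : Type} : List α → List α
  | [] => []
  | [x] => [x]
  | x :: _ :: r => x :: pvEvens r

theorem pvEvens_cons {α : Type} (x : α) (l : List α) :
    pvEvens (x :: l) = x :: pvEvens l.tail := by
  cases l <;> simp [pvEvens]

theorem pvSlice2_core {α : Type} (l : List α) :
    (List.range ((l.length + 1) / 2)).filterMap (fun k => l[2 * k]?) = pvEvens l := by
  induction l using pvEvens.induct with
  | case1 => simp [pvEvens]
  | case2 x => simp [pvEvens, List.range_succ_eq_map]
  | case3 x y r ih =>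
    have hcount : (r.length + 2 + 1) / 2 = (r.length + 1) / 2 + 1 := by omega
    simp only [pvEvens, List.length_cons, hcount, List.range_succ_eq_map,
      List.filterMap_cons, List.filterMap_map]
    have h0 : (x :: y :: r)[2 * 0]? = some x := by simp
    rw [h0]
    simp only [Function.comp]
    have hrec : ∀ k : Nat, (x :: y :: r)[2 * Nat.succ k]? = r[2 * k]? := by
      intro k
      have : 2 * Nat.succ k = (2 * k) + 1 + 1 := by omega
      simp [this]
    simp only [hrec, ih]

theorem pvSlice2 {α : Type} (l : List α) :
    PySem.List.slice? l none none 2 = some (pvEvens l) := by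
  have hidx : PySem.List.sliceIndices l.length none none 2 = (0, (l.length : Int), 2) := by
    simp [PySem.List.sliceIndices]
  simp only [PySem.List.slice?, hidx]
  norm_num
  have hcount : (if 0 < l.length then (((l.length:Int) + 2 - 1) / 2).toNat else 0) = (l.length + 1)/2 := by
    split <;> omega
  rw [hcount, ← pvSlice2_core l]
  apply List.filterMap_congr
  intro k _
  congr 1

-- ''.join is flatten.
theorem pvJoin_nil_flatten (l : List (List Char)) :
    PySem.Chars.join [] l = l.flatten := by
  induction l with
  | nil => simp [PySem.Chars.join_nil]
  | cons a t ih =>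
    cases t with
    | nil => simp [PySem.Chars.join_singleton]
    | cons b t' => rw [PySem.Chars.join_cons_cons]; simp [ih]

-- A's state machine computes the flatten of the even segments of the split.
theorem pvGo_split (cs : List Char) :
    pvGo false cs = (pvEvens (pvSplit cs)).flatten
    ∧ pvGo true cs = (pvEvens (pvSplit cs).tail).flatten := by
  induction cs with
  | nil => simp [pvGo, pvSplit, pvEvens]
  | cons c r ih =>
    by_cases hc : c = '\''
    · subst hc
      have hsp2 : pvSplit ('\'' :: r) = [] :: pvSplit r := by simp [pvSplit]
      refine ⟨?_, ?_⟩
      · rw [hsp2, pvEvens_cons]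
        simp [pvGo, ih.2]
      · rw [hsp2]
        simp [pvGo, ih.1]
    · obtain ⟨hd, t, hsp⟩ : ∃ hd t, pvSplit r = hd :: t := by
        cases hs : pvSplit r with
        | nil => exact absurd hs (pvSplit_ne_nil r)
        | cons hd t => exact ⟨hd, t, rfl⟩
      have hsp2 : pvSplit (c :: r) = (c :: hd) :: t := by
        simp [pvSplit, hc, hsp, List.modifyHead]
      refine ⟨?_, ?_⟩
      · rw [hsp2, pvEvens_cons]
        simp only [pvGo, if_neg hc]
        rw [ih.1, hsp, pvEvens_cons]
        simp
      · rw [hsp2]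
        simp only [pvGo, if_neg hc, List.tail_cons]
        rw [ih.2, hsp]
        simp

-- ===== VERDICT (by name: the statement is the Claim_ definition above) =====
theorem remove_char_literals_spec : Claim_equal_remove_char_literals := by
  intro s _
  unfold Spec_remove_char_literals remove_char_literals remove_char_literals_alt
  simp only [pvSplitOn_eq, pvSlice2, Option.getD_some, pvJoin_nil_flatten,
    pvFoldA s.toList false [], List.nil_append]
  exact congrArg String.ofList (pvGo_split s.toList).1
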